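-- pv_equiv track=rewrite | github.com/jenil1711/speech-to-speech-translation | ef_training_final.py | merge_segment_preds_to_full
-- ===== SOURCE A (Python) =====
-- from collections import defaultdict, deque
--
-- def merge_segment_preds_to_full(pred_segs, ref_segs, sample_idxs):
--     merged_preds = defaultdict(list)
--     merged_refs = defaultdict(list)
--     for p, r, s in zip(pred_segs, ref_segs, sample_idxs):
--         merged_preds[int(s)].append(p)
--         merged_refs[int(s)].append(r)
--     full_preds = [" ".join(merged_preds[k]) for k in sorted(merged_preds.keys())]
--     full_refs = [" ".join(merged_refs[k]) for k in sorted(merged_refs.keys())]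
--     return full_preds, full_refs
-- ===== SOURCE B (Python) =====
-- def _group_runs(recs):
--     # split a key-sorted record list into maximal runs of equal sample index
--     out = []
--     i, n = 0, len(recs)
--     while i < n:
--         j = i + 1
--         while j < n and int(recs[j][2]) == int(recs[i][2]):
--             j += 1
--         out.append(recs[i:j])
--         i = j
--     return out
--
-- def merge_segment_preds_to_full(pred_segs, ref_segs, sample_idxs):
--     recs = sorted(zip(pred_segs, ref_segs, sample_idxs), key=lambda t: int(t[2]))
--     groups = _group_runs(recs)
--     full_preds = [" ".join(p for p, _, _ in g) for g in groups]
--     full_refs = [" ".join(r for _, r, _ in g) for g in groups]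
--     return full_preds, full_refs
-- ===== Notes on version B (the rewrite author's own statement) =====
-- stated objective: alternative
-- what changed: B drops A's two defaultdict accumulators and sorted-keys passes: it stably sorts the zipped records by sample index once and splits the sorted list into maximal equal-index runs in a single scan, joining each run.
import Mathlib
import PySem

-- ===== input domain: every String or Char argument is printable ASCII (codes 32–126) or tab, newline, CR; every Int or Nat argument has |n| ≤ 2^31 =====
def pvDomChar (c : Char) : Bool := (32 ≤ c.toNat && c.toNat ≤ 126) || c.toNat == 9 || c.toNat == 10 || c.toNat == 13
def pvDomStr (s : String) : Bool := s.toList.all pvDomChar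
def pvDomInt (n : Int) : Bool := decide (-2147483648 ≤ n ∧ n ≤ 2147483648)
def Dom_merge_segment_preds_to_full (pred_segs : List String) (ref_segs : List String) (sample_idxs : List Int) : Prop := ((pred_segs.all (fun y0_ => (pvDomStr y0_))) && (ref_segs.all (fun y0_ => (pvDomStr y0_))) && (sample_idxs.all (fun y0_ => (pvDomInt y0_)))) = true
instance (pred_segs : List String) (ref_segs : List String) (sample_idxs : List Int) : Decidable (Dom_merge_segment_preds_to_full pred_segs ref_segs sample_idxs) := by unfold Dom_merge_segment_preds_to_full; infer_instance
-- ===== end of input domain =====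

-- B replaces A's two defaultdict accumulators and sorted-keys passes by one stable sort of the
-- zipped records by sample index followed by a single scan over maximal equal-index runs
-- (alternative decomposition, same return value).


-- ===== PORT A =====
def merge_segment_preds_to_full (pred_segs : List String) (ref_segs : List String) (sample_idxs : List Int) : List String × List String :=
  let triples := pred_segs.zip (ref_segs.zip sample_idxs)
  let merged := triples.foldl
    (fun (acc : PySem.Dict Int (List String) × PySem.Dict Int (List String)) t =>
      (acc.1.modify t.2.2 [] (· ++ [t.1]), acc.2.modify t.2.2 [] (· ++ [t.2.1])))
    (PySem.Dict.empty, PySem.Dict.empty)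
  let full_preds := (PySem.List.sorted merged.1.keys (fun k => k) false).map
    (fun k => PySem.Str.join " " (merged.1.getD k []))
  let full_refs := (PySem.List.sorted merged.2.keys (fun k => k) false).map
    (fun k => PySem.Str.join " " (merged.2.getD k []))
  (full_preds, full_refs)

-- ===== PORT B =====
-- Source B's _group_runs: split a key-sorted record list into maximal runs of equal sample index
def pvGroupRuns : List (String × String × Int) → List (List (String × String × Int))
  | [] => []
  | t :: rest =>
    (t :: rest.takeWhile (fun u => u.2.2 == t.2.2)) ::
      pvGroupRuns (rest.dropWhile (fun u => u.2.2 == t.2.2))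
termination_by l => l.length
decreasing_by
  simp only [List.length_cons]
  exact Nat.lt_succ_of_le (List.length_dropWhile_le _ _)

def merge_segment_preds_to_full_alt (pred_segs : List String) (ref_segs : List String) (sample_idxs : List Int) : List String × List String :=
  let recs := PySem.List.sorted (pred_segs.zip (ref_segs.zip sample_idxs)) (fun t => t.2.2) false
  let groups := pvGroupRuns recs
  (groups.map (fun g => PySem.Str.join " " (g.map (fun t => t.1))),
   groups.map (fun g => PySem.Str.join " " (g.map (fun t => t.2.1))))

-- ===== PRECONDITION & SPEC =====
def Spec_merge_segment_preds_to_full (pred_segs : List String) (ref_segs : List String) (sample_idxs : List Int) (out : List String × List String) : Prop := out = merge_segment_preds_to_full_alt pred_segs ref_segs sample_idxs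
instance (pred_segs : List String) (ref_segs : List String) (sample_idxs : List Int) (out : List String × List String) : Decidable (Spec_merge_segment_preds_to_full pred_segs ref_segs sample_idxs out) := by unfold Spec_merge_segment_preds_to_full; infer_instance

-- ===== CLAIM (what is proved, stated in full; the proofs are below) =====
def Claim_equal_merge_segment_preds_to_full : Prop := ∀ (pred_segs : List String) (ref_segs : List String) (sample_idxs : List Int), Dom_merge_segment_preds_to_full pred_segs ref_segs sample_idxs → Spec_merge_segment_preds_to_full pred_segs ref_segs sample_idxs (merge_segment_preds_to_full pred_segs ref_segs sample_idxs)

-- ===== LEMMAS AND PROOFS =====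

-- A defaultdict-append loop over records, read back at one key, is a filter of the records at that key.
theorem getD_group {α : Type} (l : List α) (key : α → Int) (v : α → String) (k : Int) :
    (l.foldl (fun d t => PySem.Dict.modify d (key t) [] (· ++ [v t])) PySem.Dict.empty).getD k []
      = (l.filter (fun t => key t == k)).map v := by
  have h : l.foldl (fun d t => PySem.Dict.modify d (key t) [] (· ++ [v t])) PySem.Dict.empty
      = (l.map (fun t => (key t, v t))).foldl (fun d p => PySem.Dict.modify d p.1 [] (· ++ [p.2])) PySem.Dict.empty :=
    by rw [List.foldl_map]
  rw [h]
  rw [PySem.Dict.getD_foldl_modify_append]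
  simp [List.filter_map, List.map_map, Function.comp_def]

-- The keys of that loop's dict are the distinct keys of the records, in first-appearance order.
theorem keys_group {α : Type} (l : List α) (key : α → Int) (v : α → String) :
    (l.foldl (fun d t => PySem.Dict.modify d (key t) [] (· ++ [v t])) PySem.Dict.empty).keys
      = PySem.Set.ofList (l.map key) := by
  rw [PySem.Dict.keys_foldl_modify_key (key := key) (f := fun d t => (· ++ [v t]))]
  rfl

-- insertion (as in PySem's stable sort) preserves key-sortedness
theorem insertBy_pairwise (x : String × String × Int) (acc : List (String × String × Int))
    (h : acc.Pairwise (fun a b => a.2.2 ≤ b.2.2)) :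
    (PySem.List.insertBy (fun a b => decide (a.2.2 < b.2.2)) x acc).Pairwise (fun a b => a.2.2 ≤ b.2.2) := by
  induction acc with
  | nil => simp [PySem.List.insertBy]
  | cons y ys ih =>
    rw [List.pairwise_cons] at h
    by_cases hxy : x.2.2 < y.2.2
    · simp only [PySem.List.insertBy, hxy, decide_true, if_pos]
      rw [List.pairwise_cons]
      refine ⟨?_, List.pairwise_cons.2 h⟩
      intro u hu
      rcases List.mem_cons.1 hu with rfl | hu
      · exact le_of_lt hxy
      · exact le_of_lt (lt_of_lt_of_le hxy (h.1 u hu))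
    · simp only [PySem.List.insertBy, hxy, decide_false, if_neg, Bool.false_eq_true,
        not_false_iff]
      rw [List.pairwise_cons]
      refine ⟨?_, ih h.2⟩
      intro u hu
      rcases (PySem.List.mem_insertBy _ _ _ _).1 hu with rfl | hu
      · exact le_of_not_gt hxy
      · exact h.1 u hu

-- inserting x touches the filtered-by-one-key view only by appending x at its end
theorem filter_insertBy (k : Int) (x : String × String × Int) (acc : List (String × String × Int))
    (h : acc.Pairwise (fun a b => a.2.2 ≤ b.2.2)) :
    (PySem.List.insertBy (fun a b => decide (a.2.2 < b.2.2)) x acc).filter (fun t => t.2.2 == k)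
      = acc.filter (fun t => t.2.2 == k) ++ if x.2.2 == k then [x] else [] := by
  induction acc with
  | nil =>
    simp only [PySem.List.insertBy, List.filter_nil, List.nil_append]
    by_cases hx : x.2.2 = k <;> simp [hx]
  | cons y ys ih =>
    rw [List.pairwise_cons] at h
    by_cases hxy : x.2.2 < y.2.2
    · simp only [PySem.List.insertBy, hxy, decide_true, if_pos]
      by_cases hx : x.2.2 = k
      · have hnil : (y :: ys).filter (fun t => t.2.2 == k) = [] := by
          rw [List.filter_eq_nil_iff]
          intro u hu
          have : x.2.2 < u.2.2 := by
            rcases List.mem_cons.1 hu with rfl | hu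
            · exact hxy
            · exact lt_of_lt_of_le hxy (h.1 u hu)
          simp only [beq_iff_eq]
          omega
        rw [List.filter_cons]
        simp [hx, hnil]
      · rw [List.filter_cons]
        simp [hx]
    · simp only [PySem.List.insertBy, hxy, decide_false, if_neg, Bool.false_eq_true,
        not_false_iff]
      rw [List.filter_cons, List.filter_cons, ih h.2]
      by_cases hy : y.2.2 = k <;> simp [hy]

-- STABILITY of the sort: records with one fixed key keep their original order
theorem filter_sorted (xs : List (String × String × Int)) (k : Int) :
    (PySem.List.sorted xs (fun t => t.2.2) false).filter (fun t => t.2.2 == k)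
      = xs.filter (fun t => t.2.2 == k) := by
  have main : ∀ (l acc : List (String × String × Int)),
      acc.Pairwise (fun a b => a.2.2 ≤ b.2.2) →
      (l.foldl (fun a x => PySem.List.insertBy (fun a b => decide (a.2.2 < b.2.2)) x a) acc).filter
          (fun t => t.2.2 == k)
        = acc.filter (fun t => t.2.2 == k) ++ l.filter (fun t => t.2.2 == k) := by
    intro l
    induction l with
    | nil => intro acc _; simp
    | cons x xs ih =>
      intro acc h
      simp only [List.foldl_cons]
      rw [ih _ (insertBy_pairwise x acc h), filter_insertBy k x acc h, List.filter_cons]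
      by_cases hx : x.2.2 = k <;> simp [hx]
  rw [PySem.List.sorted_eq_foldl_insertBy]
  rw [main xs [] List.Pairwise.nil]
  simp

-- after dropping the leading equal-key run, every remaining key is strictly larger
theorem key_lt_of_mem_dropWhile (t : String × String × Int) (rest : List (String × String × Int))
    (hhd : ∀ u ∈ rest, t.2.2 ≤ u.2.2) (hpw : rest.Pairwise (fun a b => a.2.2 ≤ b.2.2)) :
    ∀ u ∈ rest.dropWhile (fun u => u.2.2 == t.2.2), t.2.2 < u.2.2 := by
  induction rest with
  | nil => simp
  | cons y ys ih =>
    rw [List.pairwise_cons] at hpw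
    by_cases hy : (y.2.2 == t.2.2) = true
    · rw [List.dropWhile_cons, if_pos hy]
      exact ih (fun u hu => hhd u (List.mem_cons_of_mem _ hu)) hpw.2
    · rw [List.dropWhile_cons, if_neg hy]
      intro u hu
      have h1 : t.2.2 < y.2.2 :=
        lt_of_le_of_ne (hhd y (List.mem_cons_self)) (by simp at hy; omega)
      rcases List.mem_cons.1 hu with rfl | hu
      · exact h1
      · exact lt_of_lt_of_le h1 (hpw.1 u hu)

-- On a key-sorted list, mapping "filter at k" over the ascending distinct keys is run-splitting.
theorem pvGroupRuns_eq (S : List (String × String × Int))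
    (hp : S.Pairwise (fun a b => a.2.2 ≤ b.2.2)) :
    (PySem.List.sorted (PySem.Set.ofList (S.map (fun t => t.2.2))) (fun k => k) false).map
      (fun k => S.filter (fun u => u.2.2 == k)) = pvGroupRuns S := by
  revert hp
  induction S using pvGroupRuns.induct with
  | case1 =>
    intro _
    simp [pvGroupRuns, PySem.Set.ofList]
  | case2 t rest ih =>
    intro hp
    rw [List.pairwise_cons] at hp
    have hrun : ∀ u ∈ rest.takeWhile (fun u => u.2.2 == t.2.2), u.2.2 = t.2.2 := fun u hu => by
      simpa using List.mem_takeWhile_imp hu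
    have hrest'_pw : (rest.dropWhile (fun u => u.2.2 == t.2.2)).Pairwise
        (fun a b => a.2.2 ≤ b.2.2) :=
      hp.2.sublist (List.dropWhile_suffix _).sublist
    have hlt := key_lt_of_mem_dropWhile t rest hp.1 hp.2
    have hmem_rest : ∀ a, a ∈ (t :: rest).map (fun u => u.2.2) ↔
        a = t.2.2 ∨ a ∈ (rest.dropWhile (fun u => u.2.2 == t.2.2)).map (fun u => u.2.2) := by
      intro a
      rw [List.map_cons, List.mem_cons]
      constructor
      · intro ha
        rcases ha with rfl | ha
        · exact Or.inl rfl
        · rw [show rest = rest.takeWhile (fun u => u.2.2 == t.2.2) ++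
                rest.dropWhile (fun u => u.2.2 == t.2.2) from
              (List.takeWhile_append_dropWhile).symm, List.map_append, List.mem_append] at ha
          rcases ha with ha | ha
          · left
            rcases List.mem_map.1 ha with ⟨u, hu, rfl⟩
            exact hrun u hu
          · exact Or.inr ha
      · intro ha
        rcases ha with rfl | ha
        · exact Or.inl rfl
        · exact Or.inr (List.map_subset _ ((List.dropWhile_suffix _).subset) ha)
    have hinner_nodup : (PySem.List.sorted
        (PySem.Set.ofList ((rest.dropWhile (fun u => u.2.2 == t.2.2)).map (fun u => u.2.2)))
        (fun k => k) false).Nodup :=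
      (PySem.List.sorted_perm _ _ _).symm.nodup (PySem.Set.nodup_ofList _)
    have hinner_mem : ∀ a, a ∈ PySem.List.sorted
        (PySem.Set.ofList ((rest.dropWhile (fun u => u.2.2 == t.2.2)).map (fun u => u.2.2)))
        (fun k => k) false ↔
        a ∈ (rest.dropWhile (fun u => u.2.2 == t.2.2)).map (fun u => u.2.2) := fun a => by
      rw [PySem.List.mem_sorted, PySem.Set.mem_ofList]
    have hinner_lt : ∀ a ∈ PySem.List.sorted
        (PySem.Set.ofList ((rest.dropWhile (fun u => u.2.2 == t.2.2)).map (fun u => u.2.2)))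
        (fun k => k) false, t.2.2 < a := by
      intro a ha
      rcases List.mem_map.1 ((hinner_mem a).1 ha) with ⟨u, hu, rfl⟩
      exact hlt u hu
    have hkeys : PySem.List.sorted (PySem.Set.ofList ((t :: rest).map (fun u => u.2.2)))
          (fun k => k) false
        = t.2.2 :: PySem.List.sorted
            (PySem.Set.ofList ((rest.dropWhile (fun u => u.2.2 == t.2.2)).map (fun u => u.2.2)))
            (fun k => k) false := by
      apply PySem.List.sorted_eq_of_perm_of_pairwise_lt
      · rw [List.perm_ext_iff_of_nodup
          (List.nodup_cons.2 ⟨fun h => lt_irrefl _ (hinner_lt _ h), hinner_nodup⟩)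
          (PySem.Set.nodup_ofList _)]
        intro a
        rw [List.mem_cons, hinner_mem a, PySem.Set.mem_ofList, hmem_rest a]
      · rw [List.pairwise_cons]
        refine ⟨hinner_lt, ?_⟩
        have hle := PySem.List.sorted_pairwise
          (PySem.Set.ofList ((rest.dropWhile (fun u => u.2.2 == t.2.2)).map (fun u => u.2.2)))
          (fun k => k)
        exact (List.pairwise_and_iff.2 ⟨hle, hinner_nodup⟩).imp
          (fun h => lt_of_le_of_ne h.1 h.2)
    rw [hkeys, List.map_cons, pvGroupRuns]
    congr 1
    · rw [List.filter_cons_of_pos (by simp)]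
      congr 1
      conv_lhs => rw [show rest = rest.takeWhile (fun u => u.2.2 == t.2.2) ++
          rest.dropWhile (fun u => u.2.2 == t.2.2) from (List.takeWhile_append_dropWhile).symm]
      rw [List.filter_append]
      have h1 : (rest.takeWhile (fun u => u.2.2 == t.2.2)).filter (fun u => u.2.2 == t.2.2)
          = rest.takeWhile (fun u => u.2.2 == t.2.2) :=
        List.filter_eq_self.2 (fun u hu => by simp [hrun u hu])
      have h2 : (rest.dropWhile (fun u => u.2.2 == t.2.2)).filter (fun u => u.2.2 == t.2.2)
          = [] :=
        List.filter_eq_nil_iff.2 (fun u hu => by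
          have := hlt u hu
          simp only [beq_iff_eq]
          omega)
      rw [h1, h2, List.append_nil]
    · have hmc : (PySem.List.sorted
            (PySem.Set.ofList ((rest.dropWhile (fun u => u.2.2 == t.2.2)).map (fun u => u.2.2)))
            (fun k => k) false).map (fun k => (t :: rest).filter (fun u => u.2.2 == k))
          = (PySem.List.sorted
            (PySem.Set.ofList ((rest.dropWhile (fun u => u.2.2 == t.2.2)).map (fun u => u.2.2)))
            (fun k => k) false).map
              (fun k => (rest.dropWhile (fun u => u.2.2 == t.2.2)).filter
                (fun u => u.2.2 == k)) := by
        apply List.map_congr_left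
        intro k hk
        have hkgt : t.2.2 < k := hinner_lt k hk
        rw [List.filter_cons_of_neg (by simp only [beq_iff_eq]; omega)]
        conv_lhs => rw [show rest = rest.takeWhile (fun u => u.2.2 == t.2.2) ++
            rest.dropWhile (fun u => u.2.2 == t.2.2) from (List.takeWhile_append_dropWhile).symm]
        rw [List.filter_append]
        have h3 : (rest.takeWhile (fun u => u.2.2 == t.2.2)).filter (fun u => u.2.2 == k)
            = [] :=
          List.filter_eq_nil_iff.2 (fun u hu => by
            have := hrun u hu
            simp only [beq_iff_eq]
            omega)
        rw [h3, List.nil_append]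
      rw [hmc, ih hrest'_pw]

-- ===== VERDICT (by name: the statement is the Claim_ definition above) =====
theorem merge_segment_preds_to_full_spec : Claim_equal_merge_segment_preds_to_full := by
  intro pred_segs ref_segs sample_idxs _
  unfold Spec_merge_segment_preds_to_full merge_segment_preds_to_full merge_segment_preds_to_full_alt
  dsimp only
  rw [PySem.List.foldl_prod_mk
    (f := fun d (t : String × String × Int) => PySem.Dict.modify d t.2.2 [] (· ++ [t.1]))
    (g := fun d (t : String × String × Int) => PySem.Dict.modify d t.2.2 [] (· ++ [t.2.1]))]
  simp only [getD_group (key := fun t : String × String × Int => t.2.2) (v := fun t => t.1),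
    getD_group (key := fun t : String × String × Int => t.2.2) (v := fun t => t.2.1),
    keys_group (key := fun t : String × String × Int => t.2.2) (v := fun t => t.1),
    keys_group (key := fun t : String × String × Int => t.2.2) (v := fun t => t.2.1)]
  have hSP : (PySem.List.sorted (pred_segs.zip (ref_segs.zip sample_idxs)) (fun t => t.2.2) false).Perm
      (pred_segs.zip (ref_segs.zip sample_idxs)) := PySem.List.sorted_perm _ _ _
  have h1 : PySem.List.sorted (PySem.Set.ofList ((pred_segs.zip (ref_segs.zip sample_idxs)).map (fun t => t.2.2))) (fun k => k) false
      = PySem.List.sorted (PySem.Set.ofList ((PySem.List.sorted (pred_segs.zip (ref_segs.zip sample_idxs)) (fun t => t.2.2) false).map (fun t => t.2.2))) (fun k => k) false := by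
    apply PySem.List.sorted_eq_sorted_of_perm _ _ _ (fun a b h => h)
    rw [List.perm_ext_iff_of_nodup (PySem.Set.nodup_ofList _) (PySem.Set.nodup_ofList _)]
    intro a
    simp only [PySem.Set.mem_ofList]
    exact ((hSP.map (fun t => t.2.2)).mem_iff).symm
  rw [h1]
  simp only [← filter_sorted (pred_segs.zip (ref_segs.zip sample_idxs))]
  rw [← pvGroupRuns_eq _ (PySem.List.sorted_pairwise _ _)]
  rw [List.map_map, List.map_map]
  rfl
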